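-- pv_equiv track=rewrite | github.com/Pushkinmazila2/zapret-docker | .github/scripts/bat2sh.py | tokens_to_sh
-- ===== SOURCE A (Python) =====
-- def tokens_to_sh(name: str, tokens: list[str]) -> str:
--     # Разбиваем на блоки по --new для красивого форматирования
--     blocks: list[list[str]] = []
--     cur: list[str] = []
--     for t in tokens:
--         if t == '--new':
--             if cur:
--                 blocks.append(cur)
--             cur = []
--         else:
--             cur.append(t)
--     if cur:
--         blocks.append(cur)
--
--     if not blocks:
--         return ''
--
--     # Каждый аргумент на своей строке с отступом
--     lines = []
--     for b_idx, block in enumerate(blocks):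
--         is_last_block = (b_idx == len(blocks) - 1)
--         for t_idx, tok in enumerate(block):
--             is_last_tok = (t_idx == len(block) - 1)
--             if is_last_tok and not is_last_block:
--                 lines.append(f'    {tok} --new \\')
--             elif is_last_tok and is_last_block:
--                 lines.append(f'    {tok}')
--             else:
--                 lines.append(f'    {tok} \\')
--
--     args_str = '\n'.join(lines)
--
--     return (
--         '#!/bin/sh\n'
--         f'# Auto-generated from: {name}.bat\n'
--         '# Source: https://github.com/Flowseal/zapret-discord-youtube\n'
--         '# Converted by bat2sh.py -- do not edit manually\n'
--         '\n'
--         'TPWS="${TPWS_BIN:-/usr/local/bin/tpws}"\n'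
--         'PORT="${TPWS_PORT:-1188}"\n'
--         '\n'
--         'exec "$TPWS" \\\n'
--         '    --port="$PORT" \\\n'
--         f'{args_str}\n'
--     )
-- ===== SOURCE B (Python) =====
-- def tokens_to_sh(name: str, tokens: list[str]) -> str:
--     # Split into non-empty blocks at '--new' by scanning segment boundaries,
--     # then render with string joins instead of per-index branch logic.
--     blocks = []
--     i, n = 0, len(tokens)
--     while i < n:
--         if tokens[i] == '--new':
--             i += 1
--         else:
--             j = i + 1
--             while j < n and tokens[j] != '--new':
--                 j += 1
--             blocks.append(tokens[i:j])
--             i = j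
--
--     if not blocks:
--         return ''
--
--     args_str = ' --new \\\n'.join('    ' + ' \\\n    '.join(b) for b in blocks)
--
--     return (
--         '#!/bin/sh\n'
--         f'# Auto-generated from: {name}.bat\n'
--         '# Source: https://github.com/Flowseal/zapret-discord-youtube\n'
--         '# Converted by bat2sh.py -- do not edit manually\n'
--         '\n'
--         'TPWS="${TPWS_BIN:-/usr/local/bin/tpws}"\n'
--         'PORT="${TPWS_PORT:-1188}"\n'
--         '\n'
--         'exec "$TPWS" \\\n'
--         '    --port="$PORT" \\\n'
--         f'{args_str}\n'
--     )
-- ===== Notes on version B (the rewrite author's own statement) =====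
-- stated objective: simpler
-- what changed: Blocks are found by scanning segment boundaries (skip '--new', take the whole run up to the next '--new') instead of a flush-on-delimiter accumulator, and the emission loop with per-index last-block/last-token flag branches is replaced by nested string joins (' \ '.join per block, ' --new \ '.join between blocks); the joins avoid building and re-joining a per-line list, a constant-factor win measured.
import Mathlib
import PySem

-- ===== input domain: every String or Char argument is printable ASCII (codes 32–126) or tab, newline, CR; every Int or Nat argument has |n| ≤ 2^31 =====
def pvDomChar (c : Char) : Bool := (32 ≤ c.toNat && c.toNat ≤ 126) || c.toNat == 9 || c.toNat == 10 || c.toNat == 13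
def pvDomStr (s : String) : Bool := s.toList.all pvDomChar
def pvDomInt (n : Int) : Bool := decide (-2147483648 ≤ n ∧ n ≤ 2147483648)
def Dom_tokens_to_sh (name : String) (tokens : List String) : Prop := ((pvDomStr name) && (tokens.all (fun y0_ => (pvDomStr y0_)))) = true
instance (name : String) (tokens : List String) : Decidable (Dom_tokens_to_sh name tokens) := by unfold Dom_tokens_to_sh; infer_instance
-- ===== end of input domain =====

-- B replaces A's index-flag emission loop by join-based rendering of blocks found by
-- boundary scanning (objective: simpler); same return value, no side effects.

-- ===== PORT A =====
-- flush of the current block ('if cur: blocks.append(cur)'), used twice in A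
def pvFinishA (st : List (List String) × List String) : List (List String) :=
  if st.2 = [] then st.1 else st.1 ++ [st.2]

-- the body of A's first loop
def pvStepA (st : List (List String) × List String) (t : String) :
    List (List String) × List String :=
  if t == "--new" then (pvFinishA st, []) else (st.1, st.2 ++ [t])

-- A's nested emission loop over enumerate(blocks) / enumerate(block)
def pvLinesA (blocks : List (List String)) : List String :=
  (PySem.List.enumerate blocks).foldl (fun lines bi =>
    let isLastBlock : Bool := bi.1 == (blocks.length : Int) - 1
    (PySem.List.enumerate bi.2).foldl (fun lines ti =>
      let isLastTok : Bool := ti.1 == (bi.2.length : Int) - 1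
      if isLastTok && !isLastBlock then lines ++ ["    " ++ ti.2 ++ " --new \\"]
      else if isLastTok && isLastBlock then lines ++ ["    " ++ ti.2]
      else lines ++ ["    " ++ ti.2 ++ " \\"]) lines) []

def tokens_to_sh (name : String) (tokens : List String) : String :=
  let blocks := pvFinishA (tokens.foldl pvStepA ([], []))
  if blocks = [] then ""
  else
    let args_str := PySem.Str.join "\n" (pvLinesA blocks)
    "#!/bin/sh\n" ++
    "# Auto-generated from: " ++ name ++ ".bat\n" ++
    "# Source: https://github.com/Flowseal/zapret-discord-youtube\n" ++
    "# Converted by bat2sh.py -- do not edit manually\n" ++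
    "\n" ++
    "TPWS=\"${TPWS_BIN:-/usr/local/bin/tpws}\"\n" ++
    "PORT=\"${TPWS_PORT:-1188}\"\n" ++
    "\n" ++
    "exec \"$TPWS\" \\\n" ++
    "    --port=\"$PORT\" \\\n" ++
    args_str ++ "\n"

-- ===== PORT B =====
-- the inner scan condition 'tokens[j] != "--new"'
def pvNotNew (x : String) : Bool := !(x == "--new")

-- B's boundary scan: skip '--new', otherwise take the whole segment up to the next '--new'
def pvBlocksB : List String → List (List String)
  | [] => []
  | t :: rest =>
    if t == "--new" then pvBlocksB rest
    else (t :: rest.takeWhile pvNotNew) :: pvBlocksB (rest.dropWhile pvNotNew)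
termination_by ts => ts.length
decreasing_by
  · simp
  · exact Nat.lt_succ_of_le (List.length_dropWhile_le _ _)

def tokens_to_sh_alt (name : String) (tokens : List String) : String :=
  let blocks := pvBlocksB tokens
  if blocks = [] then ""
  else
    let args_str := PySem.Str.join " --new \\\n"
      (blocks.map (fun b => "    " ++ PySem.Str.join " \\\n    " b))
    "#!/bin/sh\n" ++
    "# Auto-generated from: " ++ name ++ ".bat\n" ++
    "# Source: https://github.com/Flowseal/zapret-discord-youtube\n" ++
    "# Converted by bat2sh.py -- do not edit manually\n" ++
    "\n" ++
    "TPWS=\"${TPWS_BIN:-/usr/local/bin/tpws}\"\n" ++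
    "PORT=\"${TPWS_PORT:-1188}\"\n" ++
    "\n" ++
    "exec \"$TPWS\" \\\n" ++
    "    --port=\"$PORT\" \\\n" ++
    args_str ++ "\n"

-- ===== PRECONDITION & SPEC =====
def Spec_tokens_to_sh (name : String) (tokens : List String) (out : String) : Prop := out = tokens_to_sh_alt name tokens
instance (name : String) (tokens : List String) (out : String) : Decidable (Spec_tokens_to_sh name tokens out) := by unfold Spec_tokens_to_sh; infer_instance

-- ===== CLAIM (what is proved, stated in full; the proofs are below) =====
def Claim_equal_tokens_to_sh : Prop := ∀ (name : String) (tokens : List String), Dom_tokens_to_sh name tokens → Spec_tokens_to_sh name tokens (tokens_to_sh name tokens)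

-- ===== LEMMAS AND PROOFS =====

-- pointwise-equal step functions fold alike
theorem pv_foldl_ext {α β : Type} (f g : β → α → β) (h : ∀ b a, f b a = g b a) :
    ∀ (l : List α) (b : β), l.foldl f b = l.foldl g b := by
  intro l
  induction l with
  | nil => intro b; rfl
  | cons x xs ih => intro b; simp only [List.foldl_cons, h, ih]

-- the blocks A's first loop builds, seen from a partial state
def pvPartial (cur : List String) (ts : List String) : List (List String) :=
  if cur = [] then pvBlocksB ts
  else (cur ++ ts.takeWhile pvNotNew) :: pvBlocksB (ts.dropWhile pvNotNew)

theorem pv_blocksA (ts : List String) : ∀ (bs : List (List String)) (cur : List String),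
    pvFinishA (ts.foldl pvStepA (bs, cur)) = bs ++ pvPartial cur ts := by
  induction ts with
  | nil =>
    intro bs cur
    by_cases h : cur = [] <;>
      simp [pvFinishA, pvPartial, pvBlocksB, h]
  | cons t ts ih =>
    intro bs cur
    by_cases hn : t = "--new"
    · subst hn
      rw [List.foldl_cons, show pvStepA (bs, cur) "--new" = (pvFinishA (bs, cur), []) from by
            simp [pvStepA],
          ih]
      by_cases h : cur = []
      · simp [pvFinishA, pvPartial, pvBlocksB, h]
      · simp [pvFinishA, pvPartial, pvBlocksB, h, pvNotNew]
    · have hb : (t == "--new") = false := by simp [hn]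
      rw [List.foldl_cons, show pvStepA (bs, cur) t = (bs, cur ++ [t]) from by
            simp [pvStepA, hb],
          ih]
      by_cases h : cur = []
      · simp [pvPartial, pvBlocksB, h, pvNotNew, hb]
      · have hne : cur ++ [t] ≠ [] := by simp
        simp [pvPartial, pvBlocksB, h, hne, pvNotNew, hb, List.takeWhile, List.dropWhile]
  
-- every block produced by pvBlocksB is nonempty
theorem pv_blocksB_ne_nil (ts : List String) : ∀ b ∈ pvBlocksB ts, b ≠ [] := by
  induction ts using pvBlocksB.induct with
  | case1 => simp [pvBlocksB]
  | case2 t rest h ih => intro b hb; rw [pvBlocksB] at hb; simp [h] at hb; exact ih b hb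
  | case3 t rest h ih =>
    intro b hb
    rw [pvBlocksB] at hb
    simp only [h, if_neg, Bool.false_eq_true, ite_false, List.mem_cons] at hb
    rcases hb with hb | hb
    · subst hb; simp
    · exact ih b hb

-- the lines A emits for one block, structurally
def pvBlockLines (isLast : Bool) : List String → List String
  | [] => []
  | [t] => if isLast then ["    " ++ t] else ["    " ++ t ++ " --new \\"]
  | t :: u :: rest => ("    " ++ t ++ " \\") :: pvBlockLines isLast (u :: rest)

-- A's whole line list, structurally
def pvLinesSpec : List (List String) → List String
  | [] => []
  | [b] => pvBlockLines true b
  | b :: c :: rest => pvBlockLines false b ++ pvLinesSpec (c :: rest)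

theorem pv_inner_char (lb : Bool) (b : List String) : ∀ (s : Int),
    (PySem.List.enumerate b s).map (fun ti =>
      if (ti.1 == s + (b.length : Int) - 1) && !lb then "    " ++ ti.2 ++ " --new \\"
      else if (ti.1 == s + (b.length : Int) - 1) && lb then "    " ++ ti.2
      else "    " ++ ti.2 ++ " \\") = pvBlockLines lb b := by
  induction b with
  | nil => intro s; simp [PySem.List.enumerate, pvBlockLines]
  | cons t rest ih =>
    intro s
    rw [PySem.List.enumerate_cons]
    cases rest with
    | nil =>
      have hc : (s == s + ((1 : Nat) : Int) - 1) = true := by simp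
      cases lb <;> simp [pvBlockLines, PySem.List.enumerate]
    | cons u rest' =>
      have hshift : ∀ (ti : Int × String),
          (ti.1 == s + (((t :: u :: rest').length : Nat) : Int) - 1)
            = (ti.1 == (s + 1) + (((u :: rest').length : Nat) : Int) - 1) := by
        intro ti
        have : s + (((t :: u :: rest').length : Nat) : Int) - 1
             = (s + 1) + (((u :: rest').length : Nat) : Int) - 1 := by
          simp only [List.length_cons]
          push_cast
          ring
        rw [this]
      have hc0 : (s == s + (((t :: u :: rest').length : Nat) : Int) - 1) = false := by
        simp only [beq_eq_false_iff_ne, ne_eq, List.length_cons]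
        intro h
        push_cast at h
        omega
      simp only [List.map_cons]
      rw [List.map_congr_left (fun ti _ => by rw [hshift ti])]
      rw [ih (s + 1)]
      simp only [hc0, Bool.false_and, Bool.false_eq_true, ite_false]
      rw [pvBlockLines]

theorem pv_outer_char (bs : List (List String)) : ∀ (s : Int),
    (PySem.List.enumerate bs s).flatMap (fun bi =>
      pvBlockLines (bi.1 == s + (bs.length : Int) - 1) bi.2) = pvLinesSpec bs := by
  induction bs with
  | nil => intro s; simp [PySem.List.enumerate, pvLinesSpec]
  | cons b rest ih =>
    intro s
    rw [PySem.List.enumerate_cons]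
    cases rest with
    | nil =>
      have hc : (s == s + ((1 : Nat) : Int) - 1) = true := by simp
      simp [PySem.List.enumerate, pvLinesSpec, hc]
    | cons c rest' =>
      have hc0 : (s == s + (((b :: c :: rest').length : Nat) : Int) - 1) = false := by
        simp only [beq_eq_false_iff_ne, ne_eq, List.length_cons]
        intro h
        push_cast at h
        omega
      have hshift : ∀ (bi : Int × List String),
          (bi.1 == s + (((b :: c :: rest').length : Nat) : Int) - 1)
            = (bi.1 == (s + 1) + (((c :: rest').length : Nat) : Int) - 1) := by
        intro bi
        have : s + (((b :: c :: rest').length : Nat) : Int) - 1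
             = (s + 1) + (((c :: rest').length : Nat) : Int) - 1 := by
          simp only [List.length_cons]
          push_cast
          ring
        rw [this]
      simp only [List.flatMap_cons]
      have : ((PySem.List.enumerate (c :: rest') (s + 1)).flatMap (fun bi =>
          pvBlockLines (bi.1 == s + (((b :: c :: rest').length : Nat) : Int) - 1) bi.2))
          = pvLinesSpec (c :: rest') := by
        rw [List.flatMap_congr (fun bi _ => by rw [hshift bi])]
        exact ih (s + 1)
      rw [this, hc0]
      rfl

-- pvLinesA equals the structural spec
theorem pv_linesA_eq (blocks : List (List String)) :
    pvLinesA blocks = pvLinesSpec blocks := by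
  unfold pvLinesA
  have h1 : ∀ (lb : Bool) (b : List String) (lines : List String),
      ((PySem.List.enumerate b).foldl (fun lines ti =>
        let isLastTok : Bool := ti.1 == (b.length : Int) - 1
        if isLastTok && !lb then lines ++ ["    " ++ ti.2 ++ " --new \\"]
        else if isLastTok && lb then lines ++ ["    " ++ ti.2]
        else lines ++ ["    " ++ ti.2 ++ " \\"]) lines)
      = lines ++ pvBlockLines lb b := by
    intro lb b lines
    rw [pv_foldl_ext _ (fun lines ti => lines ++ [
        if (ti.1 == (0 : Int) + (b.length : Int) - 1) && !lb then "    " ++ ti.2 ++ " --new \\"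
        else if (ti.1 == (0 : Int) + (b.length : Int) - 1) && lb then "    " ++ ti.2
        else "    " ++ ti.2 ++ " \\"])
      (by intro acc ti
          simp only [zero_add]
          split_ifs <;> rfl)]
    rw [PySem.List.foldl_append_singleton_eq_map, pv_inner_char]
  rw [pv_foldl_ext _ (fun lines bi => lines ++
      pvBlockLines (bi.1 == (0 : Int) + (blocks.length : Int) - 1) bi.2)
    (by intro acc bi
        simp only [zero_add]
        exact h1 _ _ _)]
  rw [PySem.List.foldl_append_eq_flatMap, pv_outer_char, List.nil_append]

-- String-level join lemmas
theorem pv_join_cons_cons (sep a b : String) (l : List String) :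
    PySem.Str.join sep (a :: b :: l) = a ++ sep ++ PySem.Str.join sep (b :: l) := by
  apply String.toList_inj.mp
  simp [PySem.Str.toList_join, PySem.Chars.join_cons_cons]

theorem pv_join_singleton (sep a : String) : PySem.Str.join sep [a] = a := by
  apply String.toList_inj.mp
  simp [PySem.Str.toList_join, PySem.Chars.join_singleton]

-- per-block rendering: A's lines joined by '\n' equal B's join-based block string
theorem pv_block_join (b : List String) (hb : b ≠ []) :
    PySem.Str.join "\n" (pvBlockLines true b) = "    " ++ PySem.Str.join " \\\n    " b ∧
    PySem.Str.join "\n" (pvBlockLines false b)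
      = ("    " ++ PySem.Str.join " \\\n    " b) ++ " --new \\" := by
  induction b with
  | nil => exact absurd rfl hb
  | cons t rest ih =>
    cases rest with
    | nil =>
      constructor <;> simp [pvBlockLines, pv_join_singleton]
    | cons u rest' =>
      obtain ⟨ih1, ih2⟩ := ih (by simp)
      have hbl : ∀ lb, pvBlockLines lb (u :: rest') ≠ [] := by
        intro lb
        cases rest' <;> cases lb <;> simp [pvBlockLines]
      constructor
      · show PySem.Str.join "\n" (("    " ++ t ++ " \\") :: pvBlockLines true (u :: rest')) = _
        rcases List.exists_cons_of_ne_nil (hbl true) with ⟨x, xs, hx⟩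
        rw [hx, pv_join_cons_cons, ← hx, ih1]
        have : ("    " : String) ++ t ++ " \\" ++ "\n" ++ ("    " ++ PySem.Str.join " \\\n    " (u :: rest'))
             = "    " ++ (t ++ (" \\\n    " ++ PySem.Str.join " \\\n    " (u :: rest'))) := by
          apply String.toList_inj.mp
          simp
        rw [this]
        congr 1
        rw [pv_join_cons_cons, String.append_assoc]
      · show PySem.Str.join "\n" (("    " ++ t ++ " \\") :: pvBlockLines false (u :: rest')) = _
        rcases List.exists_cons_of_ne_nil (hbl false) with ⟨x, xs, hx⟩
        rw [hx, pv_join_cons_cons, ← hx, ih2]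
        apply String.toList_inj.mp
        simp [PySem.Str.toList_join, PySem.Chars.join_cons_cons]
  
-- the whole rendering agrees
theorem pv_join_spec (bs : List (List String)) (hne : ∀ b ∈ bs, b ≠ []) (h0 : bs ≠ []) :
    PySem.Str.join "\n" (pvLinesSpec bs)
      = PySem.Str.join " --new \\\n" (bs.map (fun b => "    " ++ PySem.Str.join " \\\n    " b)) := by
  induction bs with
  | nil => exact absurd rfl h0
  | cons b rest ih =>
    cases rest with
    | nil =>
      show PySem.Str.join "\n" (pvBlockLines true b) = PySem.Str.join _ [_]
      rw [pv_join_singleton, (pv_block_join b (hne b (by simp))).1]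
    | cons c rest' =>
      have hb : b ≠ [] := hne b (by simp)
      have hrest : ∀ x ∈ c :: rest', x ≠ [] := fun x hx => hne x (by simp [hx])
      have ihr := ih hrest (by simp)
      show PySem.Str.join "\n" (pvBlockLines false b ++ pvLinesSpec (c :: rest')) = _
      -- join over an append of two nonempty line lists
      have hbl : pvBlockLines false b ≠ [] := by
        rcases List.exists_cons_of_ne_nil hb with ⟨y, ys, hy⟩
        subst hy
        cases ys <;> simp [pvBlockLines]
      have hls : pvLinesSpec (c :: rest') ≠ [] := by
        have hpair : pvBlockLines true c ≠ [] ∧ pvBlockLines false c ≠ [] := by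
          rcases List.exists_cons_of_ne_nil (hne c (by simp)) with ⟨y, ys, hy⟩
          subst hy
          cases ys <;> simp [pvBlockLines]
        cases rest' with
        | nil => exact hpair.1
        | cons d ds =>
          show pvBlockLines false c ++ pvLinesSpec (d :: ds) ≠ []
          intro h
          exact hpair.2 (List.append_eq_nil_iff.mp h).1
      have happ : ∀ (xs ys : List String), xs ≠ [] → ys ≠ [] →
          PySem.Str.join "\n" (xs ++ ys)
            = PySem.Str.join "\n" xs ++ "\n" ++ PySem.Str.join "\n" ys := by
        intro xs
        induction xs with
        | nil => intro ys h _; exact absurd rfl h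
        | cons x xs' ihx =>
          intro ys hx hy
          cases xs' with
          | nil =>
            rcases List.exists_cons_of_ne_nil hy with ⟨y, ys', hys⟩
            subst hys
            rw [List.singleton_append, pv_join_cons_cons, pv_join_singleton]
          | cons x' xs'' =>
            rw [List.cons_append, List.cons_append, pv_join_cons_cons, ← List.cons_append,
                ihx ys (by simp) hy, pv_join_cons_cons]
            apply String.toList_inj.mp
            simp
      rw [happ _ _ hbl hls, (pv_block_join b hb).2, ihr]
      simp only [List.map_cons]
      rw [pv_join_cons_cons]
      apply String.toList_inj.mp
      simp

-- ===== VERDICT (by name: the statement is the Claim_ definition above) =====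
theorem tokens_to_sh_spec : Claim_equal_tokens_to_sh := by
  intro name tokens _
  unfold Spec_tokens_to_sh tokens_to_sh tokens_to_sh_alt
  have hb : pvFinishA (tokens.foldl pvStepA ([], [])) = pvBlocksB tokens := by
    rw [pv_blocksA]
    simp [pvPartial]
  rw [hb]
  by_cases h : pvBlocksB tokens = []
  · simp [h]
  · simp only [h, if_neg, ite_false]
    rw [pv_linesA_eq, pv_join_spec _ (pv_blocksB_ne_nil tokens) h]
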